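-- pv_equiv track=rewrite | github.com/AdamEr8/cibus-budget-utilizer | coupons_generator.py | optimized_algo
-- ===== SOURCE A (Python) =====
-- def optimized_algo(budget, vouchers, allow_overdraft = False):
--     vouchers.sort(reverse=True)
--     possible_values = budget + min(vouchers)
--     dp = [0] + [-1] * possible_values  # Initialize a list to store the maximum value achievable for each sum
--
--     for i in range(1, possible_values + 1):
--         for option in vouchers:
--             if i - option >= 0 and dp[i - option] != -1:
--                 dp[i] = max(dp[i], dp[i - option] + option)
--
--     result = []
--     remaining = closest_to_budget(dp, budget, allow_overdraft)
--
--     while remaining > 0: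
--         for option in vouchers:
--             if remaining - option >= 0 and dp[remaining - option] == dp[remaining] - option:
--                 result.append(option)
--                 remaining -= option
--                 break
--
--     return result
--
-- def closest_to_budget(dp, budget, allow_overdraft):
--     filter_condition = lambda x: x != -1
--     filtered_list = [item for item in dp if filter_condition(item)]
--     filtered_list.sort()
--     closest_value = None
--
--     for value in filtered_list:
--         if value <= budget and (closest_value is None or budget - value < budget - closest_value):
--             closest_value = value
--     if allow_overdraft and filtered_list.index(closest_value) < len(filtered_list) - 1 and closest_value < budget:
--         closest_value = filtered_list[filtered_list.index(closest_value) + 1]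
--
--     return closest_value
-- ===== SOURCE B (Python) =====
-- def optimized_algo(budget, vouchers, allow_overdraft=False):
--     # Coin-major closure: process one voucher denomination at a time, closing the
--     # reachable-sum set under adding multiples of it (bounded), instead of A's
--     # amount-major dp-array scan of every amount against every voucher.
--     vouchers.sort(reverse=True)
--     bound = budget + vouchers[-1]  # smallest voucher after the descending sort
--     reachable = {0}
--     for o in vouchers:
--         if o > 0:
--             for s in list(reachable):
--                 if s - o not in reachable:  # walk each o-chain once, from its start
--                     t = s + o
--                     while t <= bound:
--                         reachable.add(t)
--                         t += o
--     closest = max(s for s in reachable if s <= budget)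
--     if allow_overdraft and closest < budget:
--         above = [s for s in reachable if s > closest]
--         if above:
--             closest = min(above)
--     result = []
--     remaining = closest
--     while remaining > 0:
--         for o in vouchers:
--             if o <= remaining and (remaining - o) in reachable:
--                 result.append(o)
--                 remaining -= o
--                 break
--     return result
-- ===== Notes on version B (the rewrite author's own statement) =====
-- stated objective: alternative
-- what changed: Replaces A's amount-major dp-array fill (for every amount 1..bound, scan every voucher, sentinel -1 arithmetic, then filter/sort/index to pick the closest) by a coin-major closure: each voucher denomination is processed once, the reachable-sum set is closed under its bounded multiples by walking each residue chain exactly once from its start; the closest sum is picked by max/min over the set and the list is rebuilt by set membership instead of dp-value arithmetic.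
-- outside the precondition, e.g. on optimized_algo(5, [3, -1], False): A raises IndexError, B returns [3]
import Mathlib
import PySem

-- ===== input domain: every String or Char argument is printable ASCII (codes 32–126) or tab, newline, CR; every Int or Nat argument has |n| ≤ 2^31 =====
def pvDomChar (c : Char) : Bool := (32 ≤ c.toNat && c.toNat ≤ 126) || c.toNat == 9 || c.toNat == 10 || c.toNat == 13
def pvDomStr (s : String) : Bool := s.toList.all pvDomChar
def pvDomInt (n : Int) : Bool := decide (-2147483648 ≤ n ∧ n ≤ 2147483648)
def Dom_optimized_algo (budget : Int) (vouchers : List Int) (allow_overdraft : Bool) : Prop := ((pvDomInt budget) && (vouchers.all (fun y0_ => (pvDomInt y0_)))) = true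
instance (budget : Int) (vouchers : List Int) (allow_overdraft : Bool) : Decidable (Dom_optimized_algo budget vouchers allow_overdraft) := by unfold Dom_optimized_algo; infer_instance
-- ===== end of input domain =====

-- B replaces A's amount-major sentinel dp-array fill and filter/sort/index closest-scan by a
-- coin-major closure (each denomination processed once, its residue chains walked once from their
-- starts) with max/min selection and set-membership reconstruction; A sorts `vouchers` in place
-- and so does B — the equivalence proved here is about the return value.


-- ===== PORT A =====

-- the body of the closest_to_budget selection loop
def stepC (budget : Int) (cv : Option Int) (v : Int) : Option Int :=
  if v ≤ budget && (match cv with | none => true | some c => decide (budget - v < budget - c))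
  then some v else cv

-- closest_to_budget helper: Option Int, `none` = the Python exception path (closest_value is None:
-- filtered_list.index(None) raises ValueError / the caller's `while None > 0` raises TypeError).
def pyClosestA (dp : List Int) (budget : Int) (allow_overdraft : Bool) : Option Int :=
  let filtered := PySem.List.sorted (dp.filter (fun x => x != -1)) (fun x => x) false
  match filtered.foldl (stepC budget) (none : Option Int) with
  | none => none
  | some c =>
    if allow_overdraft then
      match PySem.List.index? filtered c with
      | none => none   -- unreachable: c is an element of filtered
      | some idx =>
        if (idx : Int) < (filtered.length : Int) - 1 ∧ c < budget then filtered[idx+1]? else some c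
    else some c

-- the body of the dp-fill inner loop (`for option in vouchers`), for the current index i;
-- dp indexing uses the -1 default: under Pre_ every accessed index is in range
def stepA (i : Int) (dp : List Int) (o : Int) : List Int :=
  if 0 ≤ i - o ∧ PySem.List.pyGetD dp (i - o) (-1) ≠ -1 then
    PySem.List.pySetD dp i
      (max (PySem.List.pyGetD dp i (-1)) (PySem.List.pyGetD dp (i - o) (-1) + o))
  else dp

def dpFillA (vs : List Int) (pv : Int) : List Int :=
  (PySem.List.pyRange 1 (pv+1) 1).foldl (fun dp i => vs.foldl (stepA i) dp)
    (0 :: List.replicate pv.toNat (-1))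

-- the `while remaining > 0` loop, with fuel (Python loops forever when no option matches; both
-- ports get fuel remaining.toNat+1 and run out in lockstep, so equivalence is unaffected)
def reconA (dp vs : List Int) : Nat → Int → List Int
  | 0, _ => []
  | fuel+1, remaining =>
    if 0 < remaining then
      match vs.find? (fun o =>
          decide (0 ≤ remaining - o) &&
          (PySem.List.pyGetD dp (remaining - o) (-1) == PySem.List.pyGetD dp remaining (-1) - o)) with
      | some o => o :: reconA dp vs fuel (remaining - o)
      | none => []
    else []

def optimized_algo (budget : Int) (vouchers : List Int) (allow_overdraft : Bool) : List Int :=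
  let vs := PySem.List.sorted vouchers (fun x => x) true
  match PySem.List.min? vs (fun x => x) with
  | none => []   -- Python: min([]) raises ValueError (outside Pre_)
  | some m =>
    let dp := dpFillA vs (budget + m)
    match pyClosestA dp budget allow_overdraft with
    | none => []   -- exception path (outside Pre_)
    | some r => reconA dp vs (r.toNat + 1) r

-- ===== PORT B =====

-- the inner `while t <= bound: reachable.add(t); t += o` loop; fuel (bound-t0).toNat+1 suffices
-- because t grows by o ≥ 1 each iteration, so the port runs the loop to completion
def addMultiples (bound o : Int) : Nat → Int → PySem.Set Int → PySem.Set Int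
  | 0, _, r => r
  | fuel+1, t, r => if t ≤ bound then addMultiples bound o fuel (t + o) (PySem.Set.add r t) else r

-- `if s - o not in reachable: <while loop>` — a chain of multiples is walked only from a start
def chainStep (bound o : Int) (acc : PySem.Set Int) (s : Int) : PySem.Set Int :=
  if PySem.Set.contains acc (s - o) then acc
  else addMultiples bound o ((bound - (s + o)).toNat + 1) (s + o) acc

-- one voucher denomination: `if o > 0: for s in list(reachable): …` — the snapshot
-- list(reachable) is the set's element list; the resulting SET is order-independent (proved below)
def coinStep (bound : Int) (r : PySem.Set Int) (o : Int) : PySem.Set Int :=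
  if 0 < o then r.foldl (chainStep bound o) r else r

def reachFillB (vs : List Int) (bound : Int) : PySem.Set Int :=
  vs.foldl (coinStep bound) (PySem.Set.ofList [0])

def reconB (reach : PySem.Set Int) (vs : List Int) : Nat → Int → List Int
  | 0, _ => []
  | fuel+1, remaining =>
    if 0 < remaining then
      match vs.find? (fun o =>
          decide (o ≤ remaining) && PySem.Set.contains reach (remaining - o)) with
      | some o => o :: reconB reach vs fuel (remaining - o)
      | none => []
    else []

def optimized_algo_alt (budget : Int) (vouchers : List Int) (allow_overdraft : Bool) : List Int :=
  let vs := PySem.List.sorted vouchers (fun x => x) true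
  match PySem.List.pyGet? vs (-1) with
  | none => []   -- Python: vouchers[-1] raises IndexError on empty input (outside Pre_)
  | some m =>
    let bound := budget + m
    let reach := reachFillB vs bound
    match PySem.List.max? (reach.filter (fun s => decide (s ≤ budget))) (fun x => x) with
    | none => []   -- Python: max(empty generator) raises ValueError (outside Pre_)
    | some c0 =>
      let c := if allow_overdraft && decide (c0 < budget) then
          match PySem.List.min? (reach.filter (fun s => decide (c0 < s))) (fun x => x) with
          | some a => a
          | none => c0
        else c0
      reconB reach vs (c.toNat + 1) c

-- ===== PRECONDITION & SPEC =====
-- Pre_ excludes exactly the inputs where A raises: empty vouchers (ValueError in min), negative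
-- budget (closest_value stays None: ValueError/TypeError), and a negative voucher with every
-- budget+w ≥ 1 (IndexError: dp[i-option] indexes past the array; on that last region B's natural
-- algorithm simply ignores unusable options and returns, e.g. [3] for (5, [3, -1], False)).
def Pre_optimized_algo (budget : Int) (vouchers : List Int) (allow_overdraft : Bool) : Prop :=
  0 ≤ budget ∧ vouchers ≠ [] ∧
    ((∀ v ∈ vouchers, 0 ≤ v) ∨ (∃ w ∈ vouchers, budget + w ≤ 0))
instance (budget : Int) (vouchers : List Int) (allow_overdraft : Bool) : Decidable (Pre_optimized_algo budget vouchers allow_overdraft) := by unfold Pre_optimized_algo; infer_instance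

def pvWitness_optimized_algo : Int × List Int × Bool := (7, [2, 3], false)

def Spec_optimized_algo (budget : Int) (vouchers : List Int) (allow_overdraft : Bool) (out : List Int) : Prop := out = optimized_algo_alt budget vouchers allow_overdraft
instance (budget : Int) (vouchers : List Int) (allow_overdraft : Bool) (out : List Int) : Decidable (Spec_optimized_algo budget vouchers allow_overdraft out) := by unfold Spec_optimized_algo; infer_instance

-- ===== CLAIM (what is proved, stated in full; the proofs are below) =====
def Claim_equal_optimized_algo : Prop := ∀ (budget : Int) (vouchers : List Int) (allow_overdraft : Bool), Dom_optimized_algo budget vouchers allow_overdraft → Pre_optimized_algo budget vouchers allow_overdraft → Spec_optimized_algo budget vouchers allow_overdraft (optimized_algo budget vouchers allow_overdraft)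

-- ===== LEMMAS AND PROOFS =====

-- the multiset-of-vouchers reachability predicate both ports compute
def reachb (vs : List Int) : Nat → Bool
  | 0 => true
  | j+1 => vs.any (fun o =>
      if h : 0 < o ∧ o ≤ (j:Int)+1 then reachb vs (j+1 - o.toNat) else false)
  termination_by j => j
  decreasing_by exact Nat.sub_lt (Nat.succ_pos j) (by omega)

-- the value A's dp array holds at index j once indices 1..k have been processed
def fval (vs : List Int) (k j : Nat) : Int := if j ≤ k ∧ reachb vs j then (j:Int) else -1
-- the final dp value at index j
def gval (vs : List Int) (j : Nat) : Int := if reachb vs j then (j:Int) else -1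
-- the ascending list of reachable values ≤ n, as Ints (A's filtered_list)
def Ldef (vs : List Int) (n : Nat) : List Int :=
  List.map (fun j : Nat => (j : Int)) ((List.range (n+1)).filter (fun j => reachb vs j))

-- coin-major representability: t is a sum of nonneg multiples of the positive elements of l
def RepC : List Int → Int → Prop
  | [], t => t = 0
  | o :: r, t => if 0 < o then ∃ k : Nat, RepC r (t - k * o) else RepC r t

theorem reachb_zero (vs : List Int) : reachb vs 0 = true := by simp [reachb]

theorem reachb_pos_iff (vs : List Int) (t : Int) (ht : 0 < t) :
    reachb vs t.toNat = true ↔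
      ∃ o ∈ vs, 0 < o ∧ o ≤ t ∧ 0 ≤ t - o ∧ reachb vs (t - o).toNat = true := by
  obtain ⟨j, hj⟩ : ∃ j : Nat, t.toNat = j + 1 := ⟨t.toNat - 1, by omega⟩
  have hjt : ((j:Int)) + 1 = t := by omega
  rw [hj, reachb, List.any_eq_true]
  constructor
  · rintro ⟨o, ho, hcond⟩
    by_cases h : 0 < o ∧ o ≤ (j:Int) + 1
    · rw [dif_pos h] at hcond
      refine ⟨o, ho, h.1, by omega, by omega, ?_⟩
      have : (t - o).toNat = j + 1 - o.toNat := by omega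
      rw [this]; exact hcond
    · rw [dif_neg h] at hcond; exact absurd hcond (by simp)
  · rintro ⟨o, ho, h1, h2, h3, h4⟩
    refine ⟨o, ho, ?_⟩
    rw [dif_pos ⟨h1, by omega⟩]
    have : j + 1 - o.toNat = (t - o).toNat := by omega
    rw [this]; exact h4

theorem innerA (vsf : List Int) (n K : Nat) (hK1 : 1 ≤ K) (hKn : K ≤ n) :
    ∀ (l : List Int) (dp : List Int),
      (∀ o ∈ l, 0 ≤ o) →
      dp.length = n + 1 →
      (∀ j : Nat, j ≤ n → j ≠ K → dp.getD j (-1) = fval vsf (K-1) j) →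
      (dp.getD K (-1) = -1 ∨ dp.getD K (-1) = (K:Int)) →
      ((l.foldl (stepA (K:Int)) dp).length = n + 1) ∧
      (∀ j : Nat, j ≤ n → j ≠ K → (l.foldl (stepA (K:Int)) dp).getD j (-1) = fval vsf (K-1) j) ∧
      ((l.foldl (stepA (K:Int)) dp).getD K (-1) =
        if dp.getD K (-1) = (K:Int) ∨
           ∃ o ∈ l, 0 < o ∧ o ≤ (K:Int) ∧ 0 ≤ (K:Int) - o ∧ reachb vsf ((K:Int) - o).toNat = true
        then (K:Int) else -1) := by
  intro l
  induction l with
  | nil =>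
    intro dp _ hlen hdp h4
    refine ⟨hlen, hdp, ?_⟩
    simp only [List.foldl_nil]
    rcases h4 with h | h
    · rw [h, if_neg]
      rintro (hc | ⟨o, ho, _⟩)
      · omega
      · simp at ho
    · rw [h, if_pos (Or.inl rfl)]
  | cons o rest ih =>
    intro dp hpos hlen hdp h4
    have ho : 0 ≤ o := hpos o (List.mem_cons_self ..)
    have hpos' : ∀ x ∈ rest, 0 ≤ x := fun x hx => hpos x (List.mem_cons_of_mem _ hx)
    rw [List.foldl_cons]
    have hgetK : PySem.List.pyGetD dp ((K:Int)) (-1) = dp.getD K (-1) :=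
      PySem.List.pyGetD_natCast dp K (-1)
    have hread : ∀ o' : Int, 0 < o' → o' ≤ (K:Int) →
        PySem.List.pyGetD dp ((K:Int) - o') (-1) =
          (if reachb vsf ((K:Int) - o').toNat = true then (K:Int) - o' else -1) := by
      intro o' h1 h2
      have hidx : (K:Int) - o' = ((K - o'.toNat : Nat) : Int) := by omega
      rw [hidx, PySem.List.pyGetD_natCast, hdp _ (by omega) (by omega)]
      simp only [Int.toNat_natCast]
      unfold fval
      by_cases hr : reachb vsf (K - o'.toNat) = true
      · rw [if_pos ⟨by omega, hr⟩, if_pos hr]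
      · rw [if_neg (by tauto), if_neg hr]
    -- invariants of dp.set K ↑K, used by both updating branches
    have hsetlen : (dp.set K (K:Int)).length = n + 1 := by rw [List.length_set]; exact hlen
    have hsetdp : ∀ j, j ≤ n → j ≠ K → (dp.set K (K:Int)).getD j (-1) = fval vsf (K-1) j := by
      intro j hj hjK
      rw [List.getD_eq_getElem?_getD, List.getElem?_set, if_neg (fun h => hjK h.symm),
        ← List.getD_eq_getElem?_getD]
      exact hdp j hj hjK
    have hsetK : (dp.set K (K:Int)).getD K (-1) = (K:Int) := by
      rw [List.getD_eq_getElem?_getD, List.getElem?_set, if_pos rfl,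
        if_pos (by omega : K < dp.length)]
      rfl
    by_cases hcase : 0 < o ∧ o ≤ (K:Int) ∧ reachb vsf ((K:Int) - o).toNat = true
    · obtain ⟨ho1, ho2, hr⟩ := hcase
      have hget : PySem.List.pyGetD dp ((K:Int) - o) (-1) = (K:Int) - o := by
        rw [hread o ho1 ho2, if_pos hr]
      have hstep : stepA (K:Int) dp o = dp.set K (K:Int) := by
        unfold stepA
        rw [if_pos ⟨by omega, by rw [hget]; omega⟩, hget, hgetK,
          show (K:Int) - o + o = (K:Int) by omega, PySem.List.pySetD_natCast]
        congr 1
        rcases h4 with h | h <;> rw [h]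
        · exact max_eq_right (by omega)
        · exact max_self _
      rw [hstep]
      obtain ⟨c1, c2, c3⟩ := ih (dp.set K (K:Int)) hpos' hsetlen hsetdp (Or.inr hsetK)
      refine ⟨c1, c2, ?_⟩
      rw [c3, if_pos (Or.inl hsetK), if_pos]
      exact Or.inr ⟨o, List.mem_cons_self .., ho1, ho2, by omega, hr⟩
    · by_cases hc : 0 ≤ (K:Int) - o ∧ PySem.List.pyGetD dp ((K:Int) - o) (-1) ≠ -1
      · -- the only way given ¬hcase: o = 0 and dp[K] = K (Python re-sets dp[K] to the same value)
        have ho0 : o = 0 := by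
          by_contra hne
          have ho1 : 0 < o := by omega
          have ho2 : o ≤ (K:Int) := by omega
          by_cases hr : reachb vsf ((K:Int) - o).toNat = true
          · exact hcase ⟨ho1, ho2, hr⟩
          · exact hc.2 (by rw [hread o ho1 ho2, if_neg hr])
        subst ho0
        have hdpK : dp.getD K (-1) = (K:Int) := by
          rcases h4 with h | h
          · exfalso
            apply hc.2
            rw [show (K:Int) - 0 = ((K:Nat):Int) by omega, PySem.List.pyGetD_natCast]
            exact h
          · exact h
        have hgetK0 : PySem.List.pyGetD dp ((K:Int) - 0) (-1) = dp.getD K (-1) := by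
          rw [show (K:Int) - 0 = ((K:Nat):Int) by omega, PySem.List.pyGetD_natCast]
        have hstep : stepA (K:Int) dp 0 = dp.set K (K:Int) := by
          unfold stepA
          rw [if_pos hc, hgetK0, hgetK, hdpK, PySem.List.pySetD_natCast]
          congr 1
          simp
        rw [hstep]
        obtain ⟨c1, c2, c3⟩ := ih (dp.set K (K:Int)) hpos' hsetlen hsetdp (Or.inr hsetK)
        refine ⟨c1, c2, ?_⟩
        rw [c3, if_pos (Or.inl hsetK), if_pos (Or.inl hdpK)]
      · have hstep : stepA (K:Int) dp o = dp := by unfold stepA; rw [if_neg hc]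
        rw [hstep]
        obtain ⟨c1, c2, c3⟩ := ih dp hpos' hlen hdp h4
        refine ⟨c1, c2, ?_⟩
        rw [c3]
        have hiff : (dp.getD K (-1) = (K:Int) ∨
              ∃ o' ∈ rest, 0 < o' ∧ o' ≤ (K:Int) ∧ 0 ≤ (K:Int) - o' ∧
                reachb vsf ((K:Int) - o').toNat = true) ↔
            (dp.getD K (-1) = (K:Int) ∨
              ∃ o' ∈ o :: rest, 0 < o' ∧ o' ≤ (K:Int) ∧ 0 ≤ (K:Int) - o' ∧
                reachb vsf ((K:Int) - o').toNat = true) := by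
          constructor
          · rintro (h | ⟨o', ho', hp⟩)
            · exact Or.inl h
            · exact Or.inr ⟨o', List.mem_cons_of_mem _ ho', hp⟩
          · rintro (h | ⟨o', ho', h1, h2, h3, h5⟩)
            · exact Or.inl h
            · rcases List.mem_cons.mp ho' with rfl | ho''
              · exact absurd ⟨h3, by rw [hread o' h1 h2, if_pos h5]; omega⟩ hc
              · exact Or.inr ⟨o', ho'', h1, h2, h3, h5⟩
        rw [if_congr hiff rfl rfl]

theorem dpFillA_char (vs : List Int) (pv : Int) (hpos : 1 ≤ pv → ∀ v ∈ vs, 0 ≤ v) :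
    dpFillA vs pv = (List.range (pv.toNat + 1)).map (gval vs) := by
  unfold dpFillA
  rcases (by omega : pv ≤ 0 ∨ 0 < pv) with hle | hpos1
  · have h0 : pv.toNat = 0 := by omega
    rw [PySem.List.pyRange_one_eq_nil (by omega)]
    simp [h0, gval, reachb_zero]
  · have hpos' := hpos (by omega)
    set n := pv.toNat with hn
    have aux : ∀ k : Nat, k ≤ n →
        (PySem.List.pyRange 1 ((k:Int)+1) 1).foldl (fun dp i => vs.foldl (stepA i) dp)
          (0 :: List.replicate n (-1)) = (List.range (n+1)).map (fun j => fval vs k j) := by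
      intro k
      induction k with
      | zero =>
        intro _
        rw [PySem.List.pyRange_one_eq_nil (by omega)]
        simp only [List.foldl_nil]
        apply List.ext_getElem
        · simp
        · intro i h1 h2
          cases i with
          | zero => simp [fval, reachb_zero]
          | succ i => simp [fval]
      | succ k ihk =>
        intro hk1
        have hk : k ≤ n := by omega
        have hcast : ((k+1:Nat):Int) + 1 = ((k:Int) + 1) + 1 := by push_cast; ring
        rw [show ((k+1:Nat):Int) = (k:Int) + 1 from by push_cast; ring,
          PySem.List.pyRange_one_succ_right (by omega), List.foldl_append, ihk hk]
        simp only [List.foldl_cons, List.foldl_nil]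
        rw [show ((k:Int) + 1) = ((k+1:Nat):Int) from by push_cast; ring]
        obtain ⟨c1, c2, c3⟩ := innerA vs n (k+1) (by omega) (by omega) vs
          ((List.range (n+1)).map (fun j => fval vs k j)) hpos'
          (by simp)
          (by intro j hj hjk
              rw [PySem.List.getD_map_range _ _ _ _ (by omega)]
              simp only [Nat.add_sub_cancel])
          (Or.inl (by
            rw [PySem.List.getD_map_range _ _ _ _ (by omega)]
            exact if_neg (fun h => absurd h.1 (by omega))))
        simp only [Nat.add_sub_cancel] at c2 c3
        apply List.ext_getElem
        · rw [c1]; simp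
        · intro j h1 h2
          have hjn : j ≤ n := by simp at h2; omega
          rw [← List.getD_eq_getElem _ (-1) h1, ← List.getD_eq_getElem _ (-1) h2,
            PySem.List.getD_map_range _ _ _ _ (by omega)]
          by_cases hjk : j = k+1
          · subst hjk
            have hfv0 : fval vs k (k+1) = -1 := if_neg (fun h => absurd h.1 (by omega))
            rw [c3, PySem.List.getD_map_range _ _ _ _ (by omega), hfv0]
            have hne : ¬((-1:Int) = ((k+1:Nat):Int)) := by push_cast; omega
            have hbr := reachb_pos_iff vs ((k+1:Nat):Int) (by push_cast; omega)
            rw [Int.toNat_natCast] at hbr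
            have hcond : ((-1:Int) = ((k+1:Nat):Int) ∨
                ∃ o ∈ vs, 0 < o ∧ o ≤ ((k+1:Nat):Int) ∧ 0 ≤ ((k+1:Nat):Int) - o ∧
                  reachb vs (((k+1:Nat):Int) - o).toNat = true) ↔ reachb vs (k+1) = true := by
              rw [or_iff_right hne]
              exact hbr.symm
            have hfv1 : fval vs (k+1) (k+1) =
                if reachb vs (k+1) = true then ((k+1:Nat):Int) else -1 := by
              rw [fval]
              by_cases hr : reachb vs (k+1) = true
              · rw [if_pos ⟨le_refl _, hr⟩, if_pos hr]
              · rw [if_neg (by tauto), if_neg hr]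
            rw [if_congr hcond rfl rfl, hfv1]
          · rw [c2 j hjn hjk, fval, fval]
            have : (j ≤ k ∧ reachb vs j = true) ↔ (j ≤ k+1 ∧ reachb vs j = true) := by
              constructor <;> rintro ⟨h, hr⟩ <;> exact ⟨by omega, hr⟩
            rw [if_congr this rfl rfl]
    rw [show pv + 1 = (n:Int) + 1 from by omega, aux n le_rfl]
    apply List.map_congr_left
    intro j hj
    rw [List.mem_range] at hj
    rw [fval, gval]
    by_cases hr : reachb vs j = true
    · rw [if_pos ⟨by omega, hr⟩, if_pos hr]
    · rw [if_neg (by tauto), if_neg hr]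

-- ===== B-side: characterization of the coin-major closure =====

theorem Rep_zero (l : List Int) : RepC l 0 := by
  induction l with
  | nil => rfl
  | cons o r ih =>
    rw [RepC]
    split_ifs with ho
    · exact ⟨0, by simpa using ih⟩
    · exact ih

theorem Rep_nonneg : ∀ (l : List Int) (t : Int), RepC l t → 0 ≤ t := by
  intro l
  induction l with
  | nil => intro t h; rw [RepC] at h; omega
  | cons o r ih =>
    intro t h
    rw [RepC] at h
    by_cases ho : 0 < o
    · rw [if_pos ho] at h
      obtain ⟨k, hk⟩ := h
      have h1 := ih _ hk
      have h2 : 0 ≤ (k:Int) * o := by positivity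
      omega
    · rw [if_neg ho] at h
      exact ih _ h

theorem Rep_weaken (o : Int) (r : List Int) (t : Int) (h : RepC r t) : RepC (o :: r) t := by
  rw [RepC]
  by_cases ho : 0 < o
  · rw [if_pos ho]; exact ⟨0, by simpa using h⟩
  · rw [if_neg ho]; exact h

theorem Rep_add (o : Int) (ho : 0 < o) :
    ∀ (l : List Int) (t : Int), o ∈ l → RepC l t → RepC l (t + o) := by
  intro l
  induction l with
  | nil => intro t hmem _; exact absurd hmem (by simp)
  | cons o' r ih =>
    intro t hmem h
    rw [RepC] at h ⊢
    by_cases ho' : 0 < o'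
    · rw [if_pos ho'] at h ⊢
      obtain ⟨k, hk⟩ := h
      rcases List.mem_cons.mp hmem with rfl | hmr
      · exact ⟨k + 1, by rw [show t + o - (↑(k+1)) * o = t - (k:Int) * o from by push_cast; ring]; exact hk⟩
      · exact ⟨k, by rw [show t + o - (k:Int) * o' = t - (k:Int) * o' + o from by ring]; exact ih _ hmr hk⟩
    · rw [if_neg ho'] at h ⊢
      rcases List.mem_cons.mp hmem with rfl | hmr
      · omega
      · exact ih _ hmr h

theorem Rep_split : ∀ (l : List Int) (t : Int), 0 < t → RepC l t →
    ∃ o ∈ l, 0 < o ∧ o ≤ t ∧ RepC l (t - o) := by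
  intro l
  induction l with
  | nil => intro t ht h; rw [RepC] at h; omega
  | cons o' r ih =>
    intro t ht h
    rw [RepC] at h
    by_cases ho' : 0 < o'
    · rw [if_pos ho'] at h
      obtain ⟨k, hk⟩ := h
      cases k with
      | zero =>
        simp only [Nat.cast_zero, zero_mul, sub_zero] at hk
        obtain ⟨o, hmem, h1, h2, h3⟩ := ih t ht hk
        exact ⟨o, List.mem_cons_of_mem _ hmem, h1, h2, Rep_weaken _ _ _ h3⟩
      | succ k =>
        have hnn := Rep_nonneg _ _ hk
        have hko : 0 ≤ (k:Int) * o' := by positivity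
        have hle : o' ≤ t := by push_cast at hnn; nlinarith
        refine ⟨o', List.mem_cons_self .., ho', hle, ?_⟩
        rw [RepC, if_pos ho']
        exact ⟨k, by rw [show t - o' - (k:Int) * o' = t - (↑(k+1)) * o' from by push_cast; ring]; exact hk⟩
    · rw [if_neg ho'] at h
      obtain ⟨o, hmem, h1, h2, h3⟩ := ih t ht h
      exact ⟨o, List.mem_cons_of_mem _ hmem, h1, h2, Rep_weaken _ _ _ h3⟩

theorem Rep_iff_reachb (l : List Int) : ∀ (n : Nat), RepC l (n:Int) ↔ reachb l n = true := by
  intro n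
  induction n using Nat.strong_induction_on with
  | _ n ihn =>
    constructor
    · intro h
      cases n with
      | zero => exact reachb_zero l
      | succ m =>
        obtain ⟨o, hmem, h1, h2, h3⟩ := Rep_split l _ (by exact_mod_cast Nat.succ_pos m) h
        have hx : ((m+1:Nat):Int) - o = ((((m+1:Nat):Int) - o).toNat : Int) := by
          have := Rep_nonneg _ _ h3
          omega
        rw [hx] at h3
        have hlt : (((m+1:Nat):Int) - o).toNat < m + 1 := by omega
        have hgoal : reachb l (((m+1:Nat):Int)).toNat = true := by
          rw [reachb_pos_iff l ((m+1:Nat):Int) (by exact_mod_cast Nat.succ_pos m)]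
          exact ⟨o, hmem, h1, h2, by omega, (ihn _ hlt).mp h3⟩
        simpa using hgoal
    · intro h
      cases n with
      | zero => exact Rep_zero l
      | succ m =>
        have ht : (0:Int) < ((m+1:Nat):Int) := by exact_mod_cast Nat.succ_pos m
        have h' := h
        rw [show m + 1 = (((m+1:Nat):Int)).toNat from by omega] at h'
        obtain ⟨o, hmem, h1, h2, h3, h4⟩ := (reachb_pos_iff l _ ht).mp h'
        have hlt : (((m+1:Nat):Int) - o).toNat < m + 1 := by omega
        have h5 : RepC l ((((m+1:Nat):Int) - o).toNat : Int) := (ihn _ hlt).mpr h4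
        have h6 : RepC l (((m+1:Nat):Int) - o) := by
          rwa [show ((((m+1:Nat):Int) - o).toNat : Int) = ((m+1:Nat):Int) - o from by omega] at h5
        have := Rep_add o h1 l (((m+1:Nat):Int) - o) hmem h6
        rwa [sub_add_cancel] at this

theorem mem_addMultiples (bound o : Int) (ho : 1 ≤ o) :
    ∀ (fuel : Nat) (t0 : Int) (acc : PySem.Set Int), (bound + 1 - t0).toNat ≤ fuel →
      ∀ x, x ∈ addMultiples bound o fuel t0 acc ↔
        x ∈ acc ∨ ∃ j : Nat, x = t0 + (j:Int) * o ∧ x ≤ bound := by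
  intro fuel
  induction fuel with
  | zero =>
    intro t0 acc hf x
    rw [addMultiples]
    constructor
    · exact Or.inl
    · rintro (hx | ⟨j, rfl, hj⟩)
      · exact hx
      · exfalso
        have : 0 ≤ (j:Int) * o := by positivity
        omega
  | succ fuel ih =>
    intro t0 acc hf x
    rw [addMultiples]
    by_cases hb : t0 ≤ bound
    · have hf' : (bound + 1 - (t0 + o)).toNat ≤ fuel := by omega
      rw [if_pos hb, ih (t0 + o) _ hf' x]
      rw [PySem.Set.mem_add]
      constructor
      · rintro ((hx | rfl) | ⟨j, rfl, hj⟩)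
        · exact Or.inl hx
        · exact Or.inr ⟨0, by simp, hb⟩
        · exact Or.inr ⟨j + 1, by push_cast; ring, hj⟩
      · rintro (hx | ⟨j, rfl, hj⟩)
        · exact Or.inl (Or.inl hx)
        · cases j with
          | zero => exact Or.inl (Or.inr (by simp))
          | succ j => exact Or.inr ⟨j, by push_cast; ring, hj⟩
    · rw [if_neg hb]
      constructor
      · exact Or.inl
      · rintro (hx | ⟨j, rfl, hj⟩)
        · exact hx
        · exfalso
          have : 0 ≤ (j:Int) * o := by positivity
          omega

theorem chainStep_sub (bound o : Int) (ho : 1 ≤ o) (acc : PySem.Set Int) (s x : Int)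
    (hx : x ∈ acc) : x ∈ chainStep bound o acc s := by
  unfold chainStep
  split_ifs with hc
  · exact hx
  · exact (mem_addMultiples bound o ho _ _ _ (by omega) x).mpr (Or.inl hx)

theorem foldl_chain_sub (bound o : Int) (ho : 1 ≤ o) :
    ∀ (snap : List Int) (acc : PySem.Set Int) (x : Int),
      x ∈ acc → x ∈ snap.foldl (chainStep bound o) acc := by
  intro snap
  induction snap with
  | nil => intro acc x hx; exact hx
  | cons a rest ih =>
    intro acc x hx
    exact ih _ x (chainStep_sub bound o (by omega) acc a x hx)

theorem chainStep_upper (bound o : Int) (ho : 1 ≤ o) (acc : PySem.Set Int) (s x : Int)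
    (hx : x ∈ chainStep bound o acc s) :
    x ∈ acc ∨ ∃ j : Nat, x = s + ((j:Int) + 1) * o ∧ x ≤ bound := by
  unfold chainStep at hx
  split_ifs at hx with hc
  · exact Or.inl hx
  · rcases (mem_addMultiples bound o ho _ _ _ (by omega) x).mp hx with h | ⟨j, rfl, hj⟩
    · exact Or.inl h
    · exact Or.inr ⟨j, by push_cast; ring, hj⟩

theorem foldl_chain_upper (bound o : Int) (ho : 1 ≤ o) :
    ∀ (snap : List Int) (acc : PySem.Set Int) (x : Int),
      x ∈ snap.foldl (chainStep bound o) acc →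
      x ∈ acc ∨ ∃ s ∈ snap, ∃ j : Nat, x = s + ((j:Int) + 1) * o ∧ x ≤ bound := by
  intro snap
  induction snap with
  | nil => intro acc x hx; exact Or.inl hx
  | cons a rest ih =>
    intro acc x hx
    rcases ih _ x hx with hx' | ⟨s, hs, j, rfl, hj⟩
    · rcases chainStep_upper bound o ho acc a x hx' with h | ⟨j, rfl, hj⟩
      · exact Or.inl h
      · exact Or.inr ⟨a, List.mem_cons_self .., j, rfl, hj⟩
    · exact Or.inr ⟨s, List.mem_cons_of_mem _ hs, j, rfl, hj⟩

theorem foldl_chain_perStep (bound o : Int) (ho : 1 ≤ o) :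
    ∀ (snap : List Int) (acc : PySem.Set Int), ∀ s ∈ snap,
      (s - o) ∈ snap.foldl (chainStep bound o) acc ∨
      ∀ j : Nat, s + ((j:Int) + 1) * o ≤ bound →
        s + ((j:Int) + 1) * o ∈ snap.foldl (chainStep bound o) acc := by
  intro snap
  induction snap with
  | nil => intro acc s hs; exact absurd hs (by simp)
  | cons a rest ih =>
    intro acc s hs
    rcases List.mem_cons.mp hs with rfl | hsr
    · rw [List.foldl_cons]
      by_cases hc : PySem.Set.contains acc (s - o) = true
      · left
        exact foldl_chain_sub bound o ho rest _ _
          (chainStep_sub bound o ho acc s _ ((PySem.Set.contains_iff _ _).mp hc))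
      · right
        intro j hj
        apply foldl_chain_sub bound o ho rest _ _
        unfold chainStep
        rw [if_neg hc]
        exact (mem_addMultiples bound o ho _ _ _ (by omega) _).mpr
          (Or.inr ⟨j, by push_cast; ring, hj⟩)
    · rw [List.foldl_cons]
      exact ih _ s hsr

theorem foldl_chain_lower (bound o : Int) (ho : 1 ≤ o) (r : PySem.Set Int)
    (hnn : ∀ s ∈ r, 0 ≤ s) :
    ∀ s ∈ r, ∀ j : Nat, s + ((j:Int) + 1) * o ≤ bound →
      s + ((j:Int) + 1) * o ∈ r.foldl (chainStep bound o) r := by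
  suffices h : ∀ (n : Nat), ∀ s ∈ r, s.toNat = n → ∀ j : Nat,
      s + ((j:Int) + 1) * o ≤ bound → s + ((j:Int) + 1) * o ∈ r.foldl (chainStep bound o) r by
    intro s hs; exact h s.toNat s hs rfl
  intro n
  induction n using Nat.strong_induction_on with
  | _ n ihn =>
    intro s hs hsn j hj
    rcases foldl_chain_perStep bound o ho r r s hs with hso | hall
    · rcases foldl_chain_upper bound o ho r r _ hso with hso' | ⟨s', hs', k, hk, hkb⟩
      · -- s - o is itself an element of r: recurse on the smaller chain element
        have h0 : 0 ≤ s - o := hnn _ hso'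
        have hlt : (s - o).toNat < n := by omega
        have := ihn _ hlt (s - o) hso' rfl (j + 1)
          (by rw [show s - o + ((((j+1):Nat):Int) + 1) * o = s + ((j:Int) + 1) * o from by
                push_cast; ring]; exact hj)
        rwa [show s - o + ((((j+1):Nat):Int) + 1) * o = s + ((j:Int) + 1) * o from by
          push_cast; ring] at this
      · -- s - o = s' + (k+1)*o with s' ∈ r: recurse on the chain start s'
        have h0 : 0 ≤ s' := hnn _ hs'
        have hko : (0:Int) < ((k:Int) + 1) * o := by positivity
        have hlt : s'.toNat < n := by omega
        have harith : s' + ((((k+j+2):Nat):Int) + 1) * o = s + ((j:Int) + 1) * o := by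
          push_cast
          have : s = s' + ((k:Int) + 1) * o + o := by omega
          rw [this]; ring
        have := ihn _ hlt s' hs' rfl (k + j + 2) (by rw [harith]; exact hj)
        rwa [harith] at this
    · exact hall j hj

theorem mem_coinStep (bound : Int) (r : PySem.Set Int) (o : Int)
    (hnn : ∀ s ∈ r, 0 ≤ s) (x : Int) :
    x ∈ coinStep bound r o ↔
      x ∈ r ∨ (0 < o ∧ ∃ s ∈ r, ∃ j : Nat, x = s + ((j:Int) + 1) * o ∧ x ≤ bound) := by
  unfold coinStep
  by_cases ho : 0 < o
  · rw [if_pos ho]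
    constructor
    · intro hx
      rcases foldl_chain_upper bound o (by omega) r r x hx with h | h
      · exact Or.inl h
      · exact Or.inr ⟨ho, h⟩
    · rintro (hx | ⟨-, s, hs, j, rfl, hj⟩)
      · exact foldl_chain_sub bound o (by omega) r r x hx
      · exact foldl_chain_lower bound o (by omega) r hnn s hs j hj
  · rw [if_neg ho]
    constructor
    · exact Or.inl
    · rintro (hx | ⟨ho', -⟩)
      · exact hx
      · exact absurd ho' ho

theorem coinStep_nonneg (bound : Int) (r : PySem.Set Int) (o : Int)
    (hnn : ∀ s ∈ r, 0 ≤ s) : ∀ x ∈ coinStep bound r o, 0 ≤ x := by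
  intro x hx
  rcases (mem_coinStep bound r o hnn x).mp hx with h | ⟨ho, s, hs, j, rfl, -⟩
  · exact hnn x h
  · have h1 := hnn s hs
    have h2 : 0 ≤ ((j:Int) + 1) * o := by positivity
    omega

theorem mem_foldl_coinStep (bound : Int) :
    ∀ (l : List Int) (S : PySem.Set Int), (∀ s ∈ S, 0 ≤ s) → ∀ (x : Int),
      x ∈ l.foldl (coinStep bound) S ↔
        x ∈ S ∨ (x ≤ bound ∧ ∃ s ∈ S, s < x ∧ RepC l (x - s)) := by
  intro l
  induction l with
  | nil =>
    intro S hnn x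
    simp only [List.foldl_nil]
    constructor
    · exact Or.inl
    · rintro (hx | ⟨-, s, -, hlt, hrep⟩)
      · exact hx
      · rw [RepC] at hrep; omega
  | cons o r ih =>
    intro S hnn x
    rw [List.foldl_cons, ih _ (coinStep_nonneg bound S o hnn)]
    by_cases ho : 0 < o
    · constructor
      · rintro (hS' | ⟨hxb, s', hs', hlt, hrep⟩)
        · rcases (mem_coinStep bound S o hnn x).mp hS' with hx | ⟨-, s, hs, j, rfl, hj⟩
          · exact Or.inl hx
          · have hpos : (0:Int) < ((j:Int) + 1) * o := by positivity
            refine Or.inr ⟨hj, s, hs, by omega, ?_⟩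
            rw [RepC, if_pos ho]
            exact ⟨j + 1, by rw [show s + ((j:Int)+1)*o - s - (↑(j+1))*o = 0 from by push_cast; ring]; exact Rep_zero r⟩
        · rcases (mem_coinStep bound S o hnn s').mp hs' with hsS | ⟨-, s, hs, j, rfl, hj⟩
          · refine Or.inr ⟨hxb, s', hsS, hlt, ?_⟩
            rw [RepC, if_pos ho]
            exact ⟨0, by simpa using hrep⟩
          · have hpos : (0:Int) < ((j:Int) + 1) * o := by positivity
            refine Or.inr ⟨hxb, s, hs, by omega, ?_⟩
            rw [RepC, if_pos ho]
            exact ⟨j + 1, by rw [show x - s - (↑(j+1))*o = x - (s + ((j:Int)+1)*o) from by push_cast; ring]; exact hrep⟩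
      · rintro (hx | ⟨hxb, s, hs, hlt, hrep⟩)
        · exact Or.inl ((mem_coinStep bound S o hnn x).mpr (Or.inl hx))
        · rw [RepC, if_pos ho] at hrep
          obtain ⟨k, hk⟩ := hrep
          cases k with
          | zero =>
            refine Or.inr ⟨hxb, s, (mem_coinStep bound S o hnn s).mpr (Or.inl hs), hlt, ?_⟩
            simpa using hk
          | succ k =>
            have hnn' := Rep_nonneg _ _ hk
            have hk' : RepC r (x - (s + ((k:Int) + 1) * o)) := by
              rwa [show x - (s + ((k:Int)+1)*o) = x - s - (↑(k+1))*o from by push_cast; ring]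
            have hbnd : s + ((k:Int) + 1) * o ≤ bound := by push_cast at hnn'; omega
            have hmem' : s + ((k:Int) + 1) * o ∈ coinStep bound S o :=
              (mem_coinStep bound S o hnn _).mpr (Or.inr ⟨ho, s, hs, k, rfl, hbnd⟩)
            rcases (by push_cast at hnn'; omega :
                s + ((k:Int) + 1) * o = x ∨ s + ((k:Int) + 1) * o < x) with heq | hlt'
            · exact Or.inl (heq ▸ hmem')
            · exact Or.inr ⟨hxb, _, hmem', hlt', hk'⟩
    · have hcs : coinStep bound S o = S := by unfold coinStep; rw [if_neg ho]
      have hRep : ∀ y : Int, RepC (o :: r) y ↔ RepC r y := by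
        intro y; rw [RepC, if_neg ho]
      rw [hcs]
      constructor
      · rintro (hx | ⟨hxb, s, hs, hlt, hrep⟩)
        · exact Or.inl hx
        · exact Or.inr ⟨hxb, s, hs, hlt, (hRep _).mpr hrep⟩
      · rintro (hx | ⟨hxb, s, hs, hlt, hrep⟩)
        · exact Or.inl hx
        · exact Or.inr ⟨hxb, s, hs, hlt, (hRep _).mp hrep⟩

theorem reachFillB_char (vs : List Int) (bound : Int) (t : Int) :
    t ∈ reachFillB vs bound ↔ (t = 0 ∨ (0 < t ∧ t ≤ bound ∧ reachb vs t.toNat = true)) := by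
  unfold reachFillB
  rw [mem_foldl_coinStep bound vs _ (by intro s hs; rw [PySem.Set.mem_ofList] at hs; simp at hs; omega)]
  have h0 : ∀ s : Int, s ∈ PySem.Set.ofList [(0:Int)] ↔ s = 0 := by
    intro s; rw [PySem.Set.mem_ofList]; simp
  constructor
  · rintro (hz | ⟨hb, s, hs, hlt, hrep⟩)
    · exact Or.inl ((h0 t).mp hz)
    · have hs0 := (h0 s).mp hs
      subst hs0
      rw [sub_zero] at hrep
      refine Or.inr ⟨hlt, hb, ?_⟩
      have := (Rep_iff_reachb vs t.toNat).mp (by rwa [show ((t.toNat:Nat):Int) = t from by omega])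
      exact this
  · rintro (rfl | ⟨h1, h2, h3⟩)
    · exact Or.inl ((h0 0).mpr rfl)
    · refine Or.inr ⟨h2, 0, (h0 0).mpr rfl, h1, ?_⟩
      rw [sub_zero]
      have := (Rep_iff_reachb vs t.toNat).mpr h3
      rwa [show ((t.toNat:Nat):Int) = t from by omega] at this

-- ===== selection and reconstruction (shared with A's characterization) =====

theorem stepC_none (budget v : Int) :
    stepC budget none v = if v ≤ budget then some v else none := by
  simp [stepC]

theorem stepC_some (budget a v : Int) :
    stepC budget (some a) v = if v ≤ budget ∧ budget - v < budget - a then some v else some a := by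
  unfold stepC
  by_cases h1 : v ≤ budget <;> by_cases h2 : budget - v < budget - a <;> simp [h1, h2]

theorem closest_fold_none (budget : Int) :
    ∀ (L : List Int) (acc : Option Int), L.foldl (stepC budget) acc = none →
      acc = none ∧ ∀ y ∈ L, ¬ y ≤ budget := by
  intro L
  induction L with
  | nil => intro acc h; simpa using h
  | cons v t ih =>
    intro acc h
    rw [List.foldl_cons] at h
    cases acc with
    | none =>
      rw [stepC_none] at h
      split_ifs at h with hv
      · exact absurd ((ih _ h).1) (by simp)
      · obtain ⟨-, hrest⟩ := ih _ h
        refine ⟨rfl, ?_⟩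
        intro y hy
        rcases List.mem_cons.mp hy with rfl | hy'
        · exact hv
        · exact hrest y hy'
    | some a =>
      rw [stepC_some] at h
      split_ifs at h with hva <;> exact absurd ((ih _ h).1) (by simp)

theorem closest_fold_some (budget : Int) :
    ∀ (L : List Int) (acc : Option Int) (c : Int), L.foldl (stepC budget) acc = some c →
      (∀ a, acc = some a → a ≤ budget) →
      c ≤ budget ∧ (acc = some c ∨ c ∈ L) ∧ (∀ y ∈ L, y ≤ budget → y ≤ c) ∧
      (∀ a, acc = some a → a ≤ c) := by
  intro L
  induction L with
  | nil =>
    intro acc c h hacc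
    simp only [List.foldl_nil] at h
    subst h
    exact ⟨hacc c rfl, Or.inl rfl, by simp, fun a ha => by simp_all⟩
  | cons v t ih =>
    intro acc c h hacc
    rw [List.foldl_cons] at h
    cases acc with
    | none =>
      rw [stepC_none] at h
      split_ifs at h with hv
      · obtain ⟨h1, h2, h3, h4⟩ := ih _ _ h (by rintro a ha; cases ha; exact hv)
        refine ⟨h1, Or.inr ?_, ?_, fun a ha => absurd ha (by simp)⟩
        · rcases h2 with h2 | h2
          · cases h2; exact List.mem_cons_self ..
          · exact List.mem_cons_of_mem _ h2
        · intro y hy hyb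
          rcases List.mem_cons.mp hy with rfl | hy'
          · exact h4 y rfl
          · exact h3 y hy' hyb
      · obtain ⟨h1, h2, h3, h4⟩ := ih _ _ h (fun a ha => absurd ha (by simp))
        refine ⟨h1, ?_, ?_, fun a ha => absurd ha (by simp)⟩
        · rcases h2 with h2 | h2
          · exact absurd h2 (by simp)
          · exact Or.inr (List.mem_cons_of_mem _ h2)
        · intro y hy hyb
          rcases List.mem_cons.mp hy with rfl | hy'
          · exact absurd hyb hv
          · exact h3 y hy' hyb
    | some a =>
      rw [stepC_some] at h
      split_ifs at h with hva
      · obtain ⟨h1, h2, h3, h4⟩ := ih _ _ h (by rintro b hb; cases hb; exact hva.1)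
        have hvc : v ≤ c := h4 v rfl
        refine ⟨h1, ?_, ?_, ?_⟩
        · rcases h2 with h2 | h2
          · cases h2; exact Or.inr (List.mem_cons_self ..)
          · exact Or.inr (List.mem_cons_of_mem _ h2)
        · intro y hy hyb
          rcases List.mem_cons.mp hy with rfl | hy'
          · exact hvc
          · exact h3 y hy' hyb
        · rintro b hb; cases hb
          have h5 := hva.2
          omega
      · obtain ⟨h1, h2, h3, h4⟩ := ih _ _ h hacc
        refine ⟨h1, ?_, ?_, h4⟩
        · rcases h2 with h2 | h2
          · exact Or.inl h2
          · exact Or.inr (List.mem_cons_of_mem _ h2)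
        · intro y hy hyb
          rcases List.mem_cons.mp hy with rfl | hy'
          · have hya : y ≤ a := by
              by_cases hlt : budget - y < budget - a
              · exact absurd ⟨hyb, hlt⟩ hva
              · omega
            have := h4 a rfl
            omega
          · exact h3 y hy' hyb

theorem find?_congr_mem {α : Type} (l : List α) (p q : α → Bool) (h : ∀ x ∈ l, p x = q x) :
    l.find? p = l.find? q := by
  induction l with
  | nil => rfl
  | cons x t ih =>
    simp only [List.find?_cons]
    rw [h x (List.mem_cons_self ..)]
    cases q x with
    | true => rfl
    | false => exact ih fun y hy => h y (List.mem_cons_of_mem _ hy)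

theorem filter_gval (vs : List Int) (n : Nat) :
    ((List.range (n+1)).map (gval vs)).filter (fun x => x != -1) = Ldef vs n := by
  rw [List.filter_map, Ldef]
  have hf : (List.range (n+1)).filter ((fun x => x != -1) ∘ gval vs)
      = (List.range (n+1)).filter (fun j => reachb vs j) := by
    apply List.filter_congr
    intro j _
    by_cases hr : reachb vs j = true
    · simp [gval, hr]
    · simp [gval, hr]
  rw [hf]
  apply List.map_congr_left
  intro j hj
  have hr : reachb vs j = true := (List.mem_filter.mp hj).2
  simp [gval, hr]

theorem mem_Ldef (vs : List Int) (n : Nat) (x : Int) :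
    x ∈ Ldef vs n ↔ 0 ≤ x ∧ x.toNat ≤ n ∧ reachb vs x.toNat = true := by
  simp only [Ldef, List.mem_map, List.mem_filter, List.mem_range]
  constructor
  · rintro ⟨j, ⟨hj, hr⟩, rfl⟩
    exact ⟨by omega, by simpa using by omega, by simpa using hr⟩
  · rintro ⟨h0, hn, hr⟩
    exact ⟨x.toNat, ⟨by omega, hr⟩, by omega⟩

theorem Ldef_pairwise (vs : List Int) (n : Nat) : (Ldef vs n).Pairwise (· < ·) := by
  rw [Ldef, List.pairwise_map]
  exact (List.pairwise_lt_range.filter _).imp (by intro a b h; exact_mod_cast h)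

theorem recon_eq (vsf dp S : List Int) (bound : Int)
    (hdp : dp = (List.range (bound.toNat + 1)).map (gval vsf))
    (hS : ∀ t : Int, t ∈ S ↔ (t = 0 ∨ (0 < t ∧ t ≤ bound ∧ reachb vsf t.toNat = true))) :
    ∀ (fuel : Nat) (r : Int), r ∈ S → reconA dp vsf fuel r = reconB S vsf fuel r := by
  intro fuel
  induction fuel with
  | zero => intro r _; rfl
  | succ fuel ih =>
    intro r hr
    by_cases hr0 : 0 < r
    · have hrb : r ≤ bound ∧ reachb vsf r.toNat = true := by
        rcases (hS r).mp hr with h0 | ⟨_, h2, h3⟩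
        · exact absurd h0 (by omega)
        · exact ⟨h2, h3⟩
      have hget_r : PySem.List.pyGetD dp r (-1) = r := by
        rw [show r = ((r.toNat:Nat):Int) from by omega, PySem.List.pyGetD_natCast, hdp,
          PySem.List.getD_map_range _ _ _ _ (by omega), gval, if_pos hrb.2]
      have hpred : ∀ o ∈ vsf,
          (decide (0 ≤ r - o) &&
            (PySem.List.pyGetD dp (r - o) (-1) == PySem.List.pyGetD dp r (-1) - o))
          = (decide (o ≤ r) && PySem.Set.contains S (r - o)) := by
        intro o ho
        by_cases hor : o ≤ r
        · have h1 : decide (0 ≤ r - o) = true := by simp only [decide_eq_true_eq]; omega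
          have h2 : decide (o ≤ r) = true := by simp only [decide_eq_true_eq]; omega
          rw [h1, h2, Bool.true_and, Bool.true_and, hget_r]
          by_cases hbound : r - o ≤ bound
          · have hget_ro : PySem.List.pyGetD dp (r - o) (-1) = gval vsf (r-o).toNat := by
              rw [show r - o = (((r-o).toNat:Nat):Int) from by omega, PySem.List.pyGetD_natCast,
                hdp, PySem.List.getD_map_range _ _ _ _ (by omega), Int.toNat_natCast]
            rw [hget_ro]
            by_cases hrh : reachb vsf (r - o).toNat = true
            · have hgv : gval vsf (r-o).toNat = r - o := by
                rw [gval, if_pos hrh]; omega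
              rw [hgv]
              have hcont : PySem.Set.contains S (r - o) = true := by
                rw [PySem.Set.contains_iff, hS]
                rcases (by omega : r - o = 0 ∨ 0 < r - o) with h | h
                · exact Or.inl h
                · exact Or.inr ⟨h, hbound, hrh⟩
              rw [hcont]
              simp
            · have hgv : gval vsf (r-o).toNat = -1 := by rw [gval, if_neg hrh]
              rw [hgv]
              have hcont : PySem.Set.contains S (r - o) = false := by
                rw [← Bool.not_eq_true, PySem.Set.contains_iff, hS]
                rintro (h0 | ⟨-, -, hc⟩)
                · apply hrh; rw [h0]; exact reachb_zero vsf
                · exact hrh hc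
              rw [hcont]
              exact beq_eq_false_iff_ne.mpr (by omega)
          · have hget_ro : PySem.List.pyGetD dp (r - o) (-1) = -1 := by
              rw [show r - o = (((r-o).toNat:Nat):Int) from by omega, PySem.List.pyGetD_natCast,
                hdp, List.getD_eq_default]
              simp only [List.length_map, List.length_range]
              omega
            rw [hget_ro]
            have hcont : PySem.Set.contains S (r - o) = false := by
              rw [← Bool.not_eq_true, PySem.Set.contains_iff, hS]
              rintro (h0 | ⟨-, hb, -⟩) <;> omega
            rw [hcont]
            exact beq_eq_false_iff_ne.mpr (by omega)
        · have h1 : decide (0 ≤ r - o) = false := by simp only [decide_eq_false_iff_not]; omega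
          have h2 : decide (o ≤ r) = false := by simp only [decide_eq_false_iff_not]; omega
          rw [h1, h2, Bool.false_and, Bool.false_and]
      simp only [reconA, reconB]
      rw [if_pos hr0, if_pos hr0, find?_congr_mem vsf _ _ hpred]
      cases hfo : vsf.find? (fun o => decide (o ≤ r) && PySem.Set.contains S (r - o)) with
      | none => rfl
      | some o =>
        have hp := List.find?_some hfo
        simp only [Bool.and_eq_true, decide_eq_true_eq] at hp
        have hmem : r - o ∈ S := (PySem.Set.contains_iff _ _).mp hp.2
        show o :: reconA dp vsf fuel (r - o) = o :: reconB S vsf fuel (r - o)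
        rw [ih (r - o) hmem]
    · simp only [reconA, reconB]
      rw [if_neg hr0, if_neg hr0]

-- ===== VERDICT (by name: the statement is the Claim_ definition above) =====
theorem optimized_algo_spec : Claim_equal_optimized_algo := by
  intro budget vouchers allow hdom hpre
  obtain ⟨hb, hne, hd⟩ := hpre
  show optimized_algo budget vouchers allow = optimized_algo_alt budget vouchers allow
  set vs := PySem.List.sorted vouchers (fun x => x) true with hvsdef
  have hvs_ne : vs ≠ [] := by
    rw [hvsdef, Ne, PySem.List.sorted_eq_nil_iff]; exact hne
  cases hminA : PySem.List.min? vs (fun x => x) with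
  | none => exact absurd ((PySem.List.min?_eq_none_iff vs _).mp hminA) hvs_ne
  | some mA =>
  have hmemA : mA ∈ vs := PySem.List.min?_mem hminA
  have hminAle : ∀ v ∈ vs, mA ≤ v := PySem.List.min?_isMin hminA
  have hdesc : vs.Pairwise (fun a b => b ≤ a) := PySem.List.sorted_pairwise_rev vouchers (fun x => x)
  have hlast_mem : vs.getLast hvs_ne ∈ vs := List.getLast_mem hvs_ne
  have hlast_min : ∀ v ∈ vs, vs.getLast hvs_ne ≤ v := by
    intro v hv
    obtain ⟨i, hi, rfl⟩ := List.mem_iff_getElem.mp hv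
    rw [List.getLast_eq_getElem]
    rcases (by omega : i = vs.length - 1 ∨ i < vs.length - 1) with heq | hlt
    · subst heq; exact le_refl _
    · exact List.pairwise_iff_getElem.mp hdesc i (vs.length - 1) hi (by omega) (by omega)
  have hmeq : vs.getLast hvs_ne = mA :=
    le_antisymm (hlast_min mA hmemA) (hminAle _ hlast_mem)
  have hget : PySem.List.pyGet? vs (-1) = some mA := by
    rw [PySem.List.pyGet?_neg_one, List.getLast?_eq_some_getLast hvs_ne, hmeq]
  set bound := budget + mA with hbound
  set n := bound.toNat with hn
  have hposv : 1 ≤ bound → ∀ v ∈ vs, 0 ≤ v := by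
    intro h1 v hv
    rcases hd with hall | ⟨w, hw, hwle⟩
    · exact hall v ((PySem.List.mem_sorted vouchers _ _ v).mp (hvsdef ▸ hv))
    · exfalso
      have : mA ≤ w := hminAle w ((PySem.List.mem_sorted vouchers _ _ w).mpr hw)
      omega
  have hdp : dpFillA vs bound = (List.range (n + 1)).map (gval vs) := dpFillA_char vs bound hposv
  set S := reachFillB vs bound with hSdef
  have hS : ∀ t : Int, t ∈ S ↔ (t = 0 ∨ (0 < t ∧ t ≤ bound ∧ reachb vs t.toNat = true)) :=
    fun t => reachFillB_char vs bound t
  set LL := Ldef vs n with hLLdef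
  have hmemLS : ∀ x : Int, x ∈ LL ↔ x ∈ S := by
    intro x
    rw [hLLdef, mem_Ldef, hS]
    constructor
    · rintro ⟨h0, hxn, hr⟩
      rcases (by omega : x = 0 ∨ 0 < x) with rfl | hx
      · exact Or.inl rfl
      · exact Or.inr ⟨hx, by omega, hr⟩
    · rintro (rfl | ⟨h1, h2, h3⟩)
      · exact ⟨le_refl 0, by omega, by simpa using reachb_zero vs⟩
      · exact ⟨by omega, by omega, h3⟩
  have hfil : (dpFillA vs bound).filter (fun x => x != -1) = LL := by
    rw [hdp]; exact filter_gval vs n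
  have hpair : LL.Pairwise (· < ·) := Ldef_pairwise vs n
  have hsort : PySem.List.sorted LL (fun x => x) false = LL :=
    PySem.List.sorted_eq_self_of_pairwise LL _ (hpair.imp le_of_lt)
  have h0LL : (0:Int) ∈ LL :=
    (mem_Ldef vs n 0).mpr ⟨le_refl 0, by omega, by simpa using reachb_zero vs⟩
  cases hfold : LL.foldl (stepC budget) none with
  | none => exact absurd hb ((closest_fold_none budget LL none hfold).2 0 h0LL)
  | some c0 =>
  obtain ⟨hc0b, hc0mem', hc0max, -⟩ :=
    closest_fold_some budget LL none c0 hfold (fun a ha => absurd ha (by simp))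
  have hc0mem : c0 ∈ LL := by
    rcases hc0mem' with h | h
    · exact absurd h (by simp)
    · exact h
  have h0f : (0:Int) ∈ S.filter (fun s => decide (s ≤ budget)) :=
    List.mem_filter.mpr ⟨(hmemLS 0).mp h0LL, by simpa using hb⟩
  cases hmax : PySem.List.max? (S.filter (fun s => decide (s ≤ budget))) (fun x => x) with
  | none =>
    rw [PySem.List.max?_eq_none_iff] at hmax
    rw [hmax] at h0f
    exact absurd h0f (by simp)
  | some cB =>
  have hcBf := PySem.List.max?_mem hmax
  have hcBS : cB ∈ S := (List.mem_filter.mp hcBf).1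
  have hcBb : cB ≤ budget := by simpa using (List.mem_filter.mp hcBf).2
  have hcBmax : ∀ y ∈ S, y ≤ budget → y ≤ cB := fun y hy hyb =>
    PySem.List.max?_isMax hmax y (List.mem_filter.mpr ⟨hy, by simpa using hyb⟩)
  have hceq : c0 = cB :=
    le_antisymm (hcBmax c0 ((hmemLS c0).mp hc0mem) hc0b)
      (hc0max cB ((hmemLS cB).mpr hcBS) hcBb)
  have hrecon := recon_eq vs (dpFillA vs bound) S bound hdp hS
  -- reduce both sides
  simp only [optimized_algo, optimized_algo_alt, ← hvsdef, hminA, hget, ← hbound, ← hSdef, hmax]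
  simp only [pyClosestA, hfil, hsort, hfold]
  cases allow with
  | false =>
    simp only [Bool.false_and]
    rw [← hceq]
    exact hrecon (c0.toNat + 1) c0 ((hmemLS c0).mp hc0mem)
  | true =>
    have hidxs : (PySem.List.index? LL c0).isSome = true :=
      (PySem.List.index?_isSome_iff LL c0).mpr hc0mem
    cases hidx : PySem.List.index? LL c0 with
    | none => rw [hidx] at hidxs; simp at hidxs
    | some idx =>
    obtain ⟨hklen, hLk, -⟩ := PySem.List.getElem_of_index?_eq_some hidx
    have hmono := List.pairwise_iff_getElem.mp hpair
    simp only [reduceIte]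
    by_cases hlt : c0 < budget
    · by_cases hlast : (idx:Int) < (LL.length:Int) - 1
      · have hidx1 : idx + 1 < LL.length := by omega
        rw [if_pos ⟨hlast, hlt⟩, List.getElem?_eq_getElem hidx1]
        have hnextLL : LL[idx+1] ∈ LL := List.getElem_mem hidx1
        have hnextgt : c0 < LL[idx+1] := by
          have := hmono idx (idx+1) hklen hidx1 (by omega)
          rwa [hLk] at this
        have hnextf : LL[idx+1] ∈ S.filter (fun s => decide (c0 < s)) :=
          List.mem_filter.mpr ⟨(hmemLS _).mp hnextLL, by simpa using hnextgt⟩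
        rw [← hceq]
        simp only [Bool.true_and, decide_eq_true_eq]
        rw [if_pos hlt]
        cases hminB : PySem.List.min? (S.filter (fun s => decide (c0 < s))) (fun x => x) with
        | none =>
          rw [PySem.List.min?_eq_none_iff] at hminB
          rw [hminB] at hnextf
          exact absurd hnextf (by simp)
        | some aB =>
        have haBf := PySem.List.min?_mem hminB
        have haBS : aB ∈ S := (List.mem_filter.mp haBf).1
        have haBgt : c0 < aB := by simpa using (List.mem_filter.mp haBf).2
        have haBmin : ∀ y ∈ S.filter (fun s => decide (c0 < s)), aB ≤ y :=
          PySem.List.min?_isMin hminB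
        have haBeq : LL[idx+1] = aB := by
          refine le_antisymm ?_ (haBmin _ hnextf)
          obtain ⟨j, hj, hLj⟩ := List.mem_iff_getElem.mp ((hmemLS aB).mpr haBS)
          rcases (by omega : j ≤ idx ∨ j = idx + 1 ∨ idx + 1 < j) with hle | heq | hgt
          · exfalso
            have : LL[j] ≤ LL[idx] := by
              rcases (by omega : j = idx ∨ j < idx) with rfl | hjlt
              · exact le_refl _
              · exact le_of_lt (hmono j idx hj hklen hjlt)
            rw [hLj, hLk] at this
            omega
          · subst heq; rw [hLj]
          · have := hmono (idx+1) j hidx1 hj hgt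
            rw [hLj] at this
            exact le_of_lt this
        rw [haBeq]
        exact hrecon (aB.toNat + 1) aB haBS
      · rw [if_neg (fun h => hlast h.1), ← hceq]
        simp only [Bool.true_and, decide_eq_true_eq]
        rw [if_pos hlt]
        have hfe : S.filter (fun s => decide (c0 < s)) = [] := by
          rw [List.filter_eq_nil_iff]
          intro x hx
          simp only [decide_eq_true_eq]
          intro hgt
          obtain ⟨j, hj, hLj⟩ := List.mem_iff_getElem.mp ((hmemLS x).mpr hx)
          rcases (by omega : j ≤ idx ∨ idx < j) with hle | hgt2
          · have : LL[j] ≤ LL[idx] := by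
              rcases (by omega : j = idx ∨ j < idx) with rfl | hjlt
              · exact le_refl _
              · exact le_of_lt (hmono j idx hj hklen hjlt)
            rw [hLj, hLk] at this
            omega
          · omega
        rw [hfe, (PySem.List.min?_eq_none_iff [] (fun x : Int => x)).mpr rfl]
        exact hrecon (c0.toNat + 1) c0 ((hmemLS c0).mp hc0mem)
    · rw [if_neg (fun h => hlt h.2), ← hceq]
      simp only [Bool.true_and, decide_eq_true_eq]
      rw [if_neg hlt]
      exact hrecon (c0.toNat + 1) c0 ((hmemLS c0).mp hc0mem)
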